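-- pv_equiv track=rewrite | github.com/claudiofin/autoresearch-funzionale | src/state_machine/builder.py | _infer_sub_state_name
-- ===== SOURCE A (Python) =====
-- def _infer_sub_state_name(action_name: str) -> str:
--     """Infer the sub_state name from an action name using linguistic patterns.
--
--     Universal approach: analyzes the VERB prefix of the action name to determine
--     what kind of operation is happening, then maps to an appropriate sub_state name.
--
--     Examples:
--     - calculateCluster → calculating (verb: calculate)
--     - fetchGroupsData → fetching (verb: fetch)
--     - submitGroup → submitting (verb: submit)
--     - saveUser → saving (verb: save)
--     - loadProducts → loading (verb: load)
--     - processPayment → processing (verb: process)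
--
--     Args:
--         action_name: A single action string (e.g., "calculateCluster", "fetchGroups")
--
--     Returns:
--         The inferred sub_state name (e.g., 'calculating', 'fetching', 'loading')
--     """
--     if not action_name:
--         return "loading"
--
--     lower = action_name.lower()
--
--     # Verb prefix patterns → gerund form (universal linguistic mapping)
--     verb_patterns = [
--         ("calculate", "calculating"),
--         ("compute", "calculating"),
--         ("cluster", "calculating"),
--         ("fetch", "fetching"),
--         ("load", "loading"),
--         ("get", "loading"),
--         ("retrieve", "loading"),
--         ("submit", "submitting"),
--         ("send", "submitting"),
--         ("post", "submitting"),
--         ("save", "saving"),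
--         ("update", "saving"),
--         ("store", "saving"),
--         ("process", "processing"),
--         ("handle", "processing"),
--         ("execute", "processing"),
--         ("validate", "validating"),
--         ("verify", "validating"),
--         ("check", "validating"),
--         ("authenticate", "authenticating"),
--         ("login", "authenticating"),
--         ("register", "registering"),
--         ("signup", "registering"),
--         ("join", "joining"),
--         ("track", "tracking"),
--         ("monitor", "monitoring"),
--         ("observe", "monitoring"),
--         ("delete", "deleting"),
--         ("remove", "deleting"),
--         ("destroy", "deleting"),
--         ("create", "creating"),
--         ("add", "creating"),
--         ("generate", "creating"),
--     ]
--
--     # Find the best matching verb prefix (longest match = most specific)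
--     best_match = "loading"  # default fallback
--     best_length = 0
--
--     for verb, gerund in verb_patterns:
--         if lower.startswith(verb) or verb in lower:
--             if len(verb) > best_length:
--                 best_length = len(verb)
--                 best_match = gerund
--
--     return best_match
-- ===== SOURCE B (Python) =====
-- # Compact text table of verb -> gerund patterns, written in DESCENDING verb
-- # length (stable: equal-length verbs keep the original list's relative order),
-- # so the first substring match below is exactly the longest/most-specific match.
-- _TABLE = """authenticate authenticating
-- calculate calculating
-- retrieve loading
-- validate validating
-- register registering
-- generate creating
-- compute calculating
-- cluster calculating
-- process processing
-- execute processing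
-- monitor monitoring
-- observe monitoring
-- destroy deleting
-- submit submitting
-- update saving
-- handle processing
-- verify validating
-- signup registering
-- delete deleting
-- remove deleting
-- create creating
-- fetch fetching
-- store saving
-- check validating
-- login authenticating
-- track tracking
-- load loading
-- send submitting
-- post submitting
-- save saving
-- join joining
-- get loading
-- add creating"""
--
-- _PATTERNS = [(w[0], w[1]) for w in (line.split() for line in _TABLE.splitlines())]
--
--
-- def _infer_sub_state_name(action_name: str) -> str:
--     if not action_name:
--         return "loading"
--     lower = action_name.lower()
--     for verb, gerund in _PATTERNS:
--         if verb in lower: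
--             return gerund
--     return "loading"
-- ===== Notes on version B (the rewrite author's own statement) =====
-- stated objective: alternative
-- what changed: A scans all 33 verb patterns keeping a running best_length/best_match; B stores the patterns as a compact text table already ordered by descending verb length (stable, preserving the original tie order), parses it once, and returns the gerund of the first verb that is a substring with an early return and no best-tracking (the redundant startswith test, implied by substring containment, is dropped).
import Mathlib
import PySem

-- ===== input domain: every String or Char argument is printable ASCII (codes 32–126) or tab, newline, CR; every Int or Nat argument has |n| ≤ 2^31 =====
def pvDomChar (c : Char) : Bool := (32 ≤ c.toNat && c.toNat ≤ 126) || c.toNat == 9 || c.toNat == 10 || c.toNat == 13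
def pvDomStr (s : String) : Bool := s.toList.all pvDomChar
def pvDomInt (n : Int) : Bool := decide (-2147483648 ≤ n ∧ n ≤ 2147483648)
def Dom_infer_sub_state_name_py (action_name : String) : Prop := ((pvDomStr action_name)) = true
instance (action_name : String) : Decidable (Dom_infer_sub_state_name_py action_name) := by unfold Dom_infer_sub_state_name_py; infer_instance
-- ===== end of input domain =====

-- B replaces A's scan-all-patterns-with-running-best loop by a compact text table
-- already ordered by descending verb length, parsed once and scanned with an early
-- return at the first substring match (an alternative of the same cost).

-- ===== PORT A =====
def pvVerbPatterns : List (String × String) := [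
  ("calculate", "calculating"), ("compute", "calculating"), ("cluster", "calculating"),
  ("fetch", "fetching"), ("load", "loading"), ("get", "loading"), ("retrieve", "loading"),
  ("submit", "submitting"), ("send", "submitting"), ("post", "submitting"),
  ("save", "saving"), ("update", "saving"), ("store", "saving"),
  ("process", "processing"), ("handle", "processing"), ("execute", "processing"),
  ("validate", "validating"), ("verify", "validating"), ("check", "validating"),
  ("authenticate", "authenticating"), ("login", "authenticating"),
  ("register", "registering"), ("signup", "registering"), ("join", "joining"),
  ("track", "tracking"), ("monitor", "monitoring"), ("observe", "monitoring"),
  ("delete", "deleting"), ("remove", "deleting"), ("destroy", "deleting"),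
  ("create", "creating"), ("add", "creating"), ("generate", "creating")]

def infer_sub_state_name_py (action_name : String) : String :=
  if action_name = "" then "loading"
  else
    let lower := PySem.Str.lower action_name
    (pvVerbPatterns.foldl (fun (acc : Int × String) vg =>
        if PySem.Str.startswith lower vg.1 || PySem.Str.isIn vg.1 lower then
          if PySem.Str.len vg.1 > acc.1 then (PySem.Str.len vg.1, vg.2) else acc
        else acc) (0, "loading")).2

-- ===== PORT B =====
-- Source B's _TABLE: one text constant, lines in descending verb length (stable order)
def pvTable : String := "authenticate authenticating\ncalculate calculating\nretrieve loading\nvalidate validating\nregister registering\ngenerate creating\ncompute calculating\ncluster calculating\nprocess processing\nexecute processing\nmonitor monitoring\nobserve monitoring\ndestroy deleting\nsubmit submitting\nupdate saving\nhandle processing\nverify validating\nsignup registering\ndelete deleting\nremove deleting\ncreate creating\nfetch fetching\nstore saving\ncheck validating\nlogin authenticating\ntrack tracking\nload loading\nsend submitting\npost submitting\nsave saving\njoin joining\nget loading\nadd creating"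

-- Source B's _PATTERNS = [(w[0], w[1]) for w in (line.split() for line in _TABLE.splitlines())]
-- (w[0]/w[1] always exist on this literal table, so the .getD "" defaults are unreachable)
def pvPatterns : List (String × String) :=
  (PySem.Str.splitlines pvTable).map (fun line =>
    let w := PySem.Str.split₀ line
    ((PySem.List.pyGet? w 0).getD "", (PySem.List.pyGet? w 1).getD ""))

-- the for-loop with early return
def pvScan (lower : String) : List (String × String) → String
  | [] => "loading"
  | vg :: rest => if PySem.Str.isIn vg.1 lower then vg.2 else pvScan lower rest

def infer_sub_state_name_py_alt (action_name : String) : String :=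
  if action_name = "" then "loading"
  else pvScan (PySem.Str.lower action_name) pvPatterns

-- ===== PRECONDITION & SPEC =====
def Spec_infer_sub_state_name_py (action_name : String) (out : String) : Prop := out = infer_sub_state_name_py_alt action_name
instance (action_name : String) (out : String) : Decidable (Spec_infer_sub_state_name_py action_name out) := by unfold Spec_infer_sub_state_name_py; infer_instance

-- ===== CLAIM (what is proved, stated in full; the proofs are below) =====
def Claim_equal_infer_sub_state_name_py : Prop := ∀ (action_name : String), Dom_infer_sub_state_name_py action_name → Spec_infer_sub_state_name_py action_name (infer_sub_state_name_py action_name)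

-- ===== LEMMAS AND PROOFS =====

-- B's parsed table is exactly the stable descending-length sort of A's pattern list
set_option maxRecDepth 8000 in
set_option maxHeartbeats 2000000 in
theorem pvPatterns_eq_sorted :
    pvPatterns = PySem.List.sorted pvVerbPatterns (fun vg => PySem.Str.len vg.1) true := by
  decide

-- body of A's loop, abstracted over the match predicate
def pvStep (p : String → Bool) (acc : Int × String) (vg : String × String) : Int × String :=
  if p vg.1 then
    if PySem.Str.len vg.1 > acc.1 then (PySem.Str.len vg.1, vg.2) else acc
  else acc

-- first-match-updates view of the running-best accumulator, for a sorted list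
def pvG (p : String → Bool) (acc : Int × String) : List (String × String) → Int × String
  | [] => acc
  | vg :: S =>
    if p vg.1 then
      if PySem.Str.len vg.1 > acc.1 then (PySem.Str.len vg.1, vg.2) else acc
    else pvG p acc S

theorem pvG_spec (p : String → Bool) (acc : Int × String) (S : List (String × String)) :
    pvG p acc S = acc ∨ ∃ vg, vg ∈ S ∧ pvG p acc S = (PySem.Str.len vg.1, vg.2) ∧ acc.1 < PySem.Str.len vg.1 := by
  induction S with
  | nil => left; rfl
  | cons y T ih =>
    by_cases hy : p y.1 = true
    · by_cases hl : PySem.Str.len y.1 > acc.1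
      · right
        refine ⟨y, List.mem_cons_self, ?_, hl⟩
        simp only [pvG, hy, if_pos, hl]
      · left
        simp only [pvG, hy, if_true, hl, if_false]
    · have hG : pvG p acc (y :: T) = pvG p acc T := by
        simp only [pvG, hy, Bool.false_eq_true, if_false]
      rw [hG]
      rcases ih with h | ⟨vg, hm, he, hlt⟩
      · exact Or.inl h
      · exact Or.inr ⟨vg, List.mem_cons_of_mem _ hm, he, hlt⟩

-- the key step/insert exchange on a length-descending sorted list
theorem pvL (p : String → Bool) (x : String × String) (acc : Int × String)
    (S : List (String × String))
    (hs : S.Pairwise (fun a b => PySem.Str.len b.1 ≤ PySem.Str.len a.1)) :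
    pvStep p (pvG p acc S) x
      = pvG p acc (PySem.List.insertBy (fun a b => decide (PySem.Str.len b.1 < PySem.Str.len a.1)) x S) := by
  induction S with
  | nil => simp only [pvG, pvStep, PySem.List.insertBy]
  | cons y T ih =>
    have hyT : ∀ z ∈ T, PySem.Str.len z.1 ≤ PySem.Str.len y.1 := (List.pairwise_cons.mp hs).1
    have hsT : T.Pairwise (fun a b => PySem.Str.len b.1 ≤ PySem.Str.len a.1) := (List.pairwise_cons.mp hs).2
    simp only [PySem.List.insertBy, decide_eq_true_eq]
    by_cases hcmp : PySem.Str.len y.1 < PySem.Str.len x.1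
    · rw [if_pos hcmp]
      by_cases hx : p x.1 = true
      · rcases pvG_spec p acc (y :: T) with h | ⟨vg, hm, he, hlt⟩
        · rw [h]
          simp only [pvStep, pvG, hx, if_true]
        · have hvg : PySem.Str.len vg.1 ≤ PySem.Str.len y.1 := by
            rcases List.mem_cons.mp hm with h1 | h2
            · rw [h1]
            · exact hyT _ h2
          have h1 : PySem.Str.len vg.1 < PySem.Str.len x.1 := lt_of_le_of_lt hvg hcmp
          have h2 : acc.1 < PySem.Str.len x.1 := lt_trans hlt h1
          rw [he]
          show (if p x.1 = true then _ else _) = pvG p acc (x :: y :: T)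
          rw [if_pos hx]
          simp only [pvG, hx, if_true, gt_iff_lt]
          rw [if_pos h1, if_pos h2]
      · have hx' : p x.1 = false := Bool.eq_false_iff.mpr hx
        simp only [pvStep, pvG, hx', Bool.false_eq_true, if_false]
    · rw [if_neg hcmp]
      have hxy : PySem.Str.len x.1 ≤ PySem.Str.len y.1 := le_of_not_gt hcmp
      by_cases hy : p y.1 = true
      · by_cases hl : PySem.Str.len y.1 > acc.1
        · have hnx : ¬ (PySem.Str.len x.1 > PySem.Str.len y.1) := not_lt_of_ge hxy
          simp only [pvG, hy, if_true, gt_iff_lt]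
          rw [if_pos hl]
          simp only [pvStep, gt_iff_lt]
          rw [if_neg hnx]
          split
          · rfl
          · rfl
        · have hxa : ¬ (PySem.Str.len x.1 > acc.1) := by
            have h1 : PySem.Str.len y.1 ≤ acc.1 := le_of_not_gt hl
            exact not_lt_of_ge (le_trans hxy h1)
          simp only [pvG, hy, if_true, gt_iff_lt]
          rw [if_neg hl]
          simp only [pvStep, gt_iff_lt]
          rw [if_neg hxa]
          split
          · rfl
          · rfl
      · have hy' : p y.1 = false := Bool.eq_false_iff.mpr hy
        simp only [pvG, hy', Bool.false_eq_true, if_false]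
        exact ih hsT

-- A's left fold over any list equals the first-match view over its stable desc sort
theorem pvMain (p : String → Bool) (l : List (String × String)) (acc : Int × String) :
    l.foldl (pvStep p) acc
      = pvG p acc (PySem.List.sorted l (fun vg => PySem.Str.len vg.1) true) := by
  induction l using List.reverseRecOn generalizing acc with
  | nil =>
    rw [PySem.List.sorted_rev_eq_foldl_insertBy]
    rfl
  | append_singleton l x ih =>
    have hs : PySem.List.sorted (l ++ [x]) (fun vg => PySem.Str.len vg.1) true
        = PySem.List.insertBy (fun a b => decide (PySem.Str.len b.1 < PySem.Str.len a.1)) x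
            (PySem.List.sorted l (fun vg => PySem.Str.len vg.1) true) := by
      rw [PySem.List.sorted_rev_eq_foldl_insertBy, PySem.List.sorted_rev_eq_foldl_insertBy,
          List.foldl_append, List.foldl_cons, List.foldl_nil]
    rw [List.foldl_append, List.foldl_cons, List.foldl_nil, ih, hs]
    exact pvL p x acc _ (PySem.List.sorted_pairwise_rev l (fun vg => PySem.Str.len vg.1))

theorem pvScan_eq_pvG (lower : String) (S : List (String × String))
    (h : ∀ vg ∈ S, (0:Int) < PySem.Str.len vg.1) :
    pvScan lower S = (pvG (fun v => PySem.Str.isIn v lower) (0, "loading") S).2 := by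
  induction S with
  | nil => rfl
  | cons y T ih =>
    by_cases hy : PySem.Str.isIn y.1 lower = true
    · have h0 : (0:Int) < PySem.Str.len y.1 := h y List.mem_cons_self
      simp only [pvScan, pvG, hy, gt_iff_lt, h0, if_pos]
    · simp only [pvScan, pvG, hy, Bool.false_eq_true, if_false]
      exact ih (fun vg hm => h vg (List.mem_cons_of_mem _ hm))

-- in Python, lower.startswith(verb) implies verb in lower
theorem pvMatch (s v : String) :
    (PySem.Str.startswith s v || PySem.Str.isIn v s) = PySem.Str.isIn v s := by
  cases h : PySem.Str.startswith s v with
  | false => simp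
  | true =>
    have hpre : v.toList <+: s.toList := by
      have hb := PySem.Str.startswith_eq s v
      rw [h] at hb
      exact (PySem.Chars.startswith_iff _ _).mp hb.symm
    have hin : PySem.Str.isIn v s = true := by
      rw [PySem.Str.isIn_iff_infix]
      exact hpre.isInfix
    rw [hin]
    rfl

set_option maxRecDepth 8000 in
set_option maxHeartbeats 2000000 in
theorem pvPatterns_pos : ∀ vg ∈ pvPatterns, (0:Int) < PySem.Str.len vg.1 := by decide

-- ===== VERDICT (by name: the statement is the Claim_ definition above) =====
theorem infer_sub_state_name_py_spec : Claim_equal_infer_sub_state_name_py := by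
  intro action_name _
  unfold Spec_infer_sub_state_name_py infer_sub_state_name_py infer_sub_state_name_py_alt
  by_cases he : action_name = ""
  · simp only [he, if_pos]
  · simp only [he, if_neg, not_false_iff]
    have hfun : (fun (acc : Int × String) (vg : String × String) =>
        if PySem.Str.startswith (PySem.Str.lower action_name) vg.1 || PySem.Str.isIn vg.1 (PySem.Str.lower action_name) then
          if PySem.Str.len vg.1 > acc.1 then (PySem.Str.len vg.1, vg.2) else acc
        else acc) = pvStep (fun v => PySem.Str.isIn v (PySem.Str.lower action_name)) := by
      funext acc vg
      rw [pvMatch]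
      rfl
    rw [hfun, pvMain, ← pvPatterns_eq_sorted, pvScan_eq_pvG _ _ pvPatterns_pos]
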